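-- pv_equiv track=rewrite | github.com/astepe/shoplist | setup_database.py | determine_ingredient_type
-- ===== SOURCE A (Python) =====
-- def determine_ingredient_type(ingredient_name):
--     """Determine ingredient type based on name."""
--     name_lower = ingredient_name.lower()
--
--     # Vegetables
--     vegetables = ['celery', 'onion', 'tomato', 'carrot', 'bell pepper', 'garlic', 'potato',
--                   'sweet potato', 'broccoli', 'cauliflower', 'cabbage', 'spinach', 'lettuce']
--
--     # Fruits
--     fruits = ['avocado', 'lemon', 'lime']
--
--     # Grains & Legumes
--     grains = ['rice', 'lentils', 'quinoa']
--
--     # Herbs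
--     herbs = ['parsley', 'cilantro', 'basil']
--
--     # Nuts & Seeds
--     nuts = ['almonds', 'cashews']
--
--     if any(v in name_lower for v in vegetables):
--         return 'Vegetables'
--     elif any(f in name_lower for f in fruits):
--         return 'Fruits'
--     elif any(g in name_lower for g in grains):
--         return 'Grains'
--     elif any(h in name_lower for h in herbs):
--         return 'Herbs'
--     elif any(n in name_lower for n in nuts):
--         return 'Nuts & Seeds'
--     else:
--         return 'Pantry Items'  # Default fallback
-- ===== SOURCE B (Python) =====
-- def determine_ingredient_type(ingredient_name):
--     """Determine ingredient type based on name."""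
--     table = {
--         'celery': (0, 'Vegetables'), 'onion': (0, 'Vegetables'), 'tomato': (0, 'Vegetables'),
--         'carrot': (0, 'Vegetables'), 'bell pepper': (0, 'Vegetables'), 'garlic': (0, 'Vegetables'),
--         'potato': (0, 'Vegetables'), 'sweet potato': (0, 'Vegetables'), 'broccoli': (0, 'Vegetables'),
--         'cauliflower': (0, 'Vegetables'), 'cabbage': (0, 'Vegetables'), 'spinach': (0, 'Vegetables'),
--         'lettuce': (0, 'Vegetables'),
--         'avocado': (1, 'Fruits'), 'lemon': (1, 'Fruits'), 'lime': (1, 'Fruits'),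
--         'rice': (2, 'Grains'), 'lentils': (2, 'Grains'), 'quinoa': (2, 'Grains'),
--         'parsley': (3, 'Herbs'), 'cilantro': (3, 'Herbs'), 'basil': (3, 'Herbs'),
--         'almonds': (4, 'Nuts & Seeds'), 'cashews': (4, 'Nuts & Seeds'),
--     }
--     lengths = {len(k) for k in table}
--     s = ingredient_name.lower()
--     best = (5, 'Pantry Items')
--     # Scan the NAME: for every start position and every keyword length, hash-look up
--     # the window substring; keep the hit of smallest category priority.
--     for i in range(len(s)):
--         for L in lengths:
--             hit = table.get(s[i:i + L])
--             if hit is not None and hit[0] < best[0]: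
--                 best = hit
--     return best[1]
-- ===== Notes on version B (the rewrite author's own statement) =====
-- stated objective: alternative
-- what changed: Instead of testing each keyword for containment in the name, B scans the name itself: for every start position and every keyword length it hash-looks-up the window substring in a dict keyword->(priority,category) and keeps the hit of smallest category priority.
import Mathlib
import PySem

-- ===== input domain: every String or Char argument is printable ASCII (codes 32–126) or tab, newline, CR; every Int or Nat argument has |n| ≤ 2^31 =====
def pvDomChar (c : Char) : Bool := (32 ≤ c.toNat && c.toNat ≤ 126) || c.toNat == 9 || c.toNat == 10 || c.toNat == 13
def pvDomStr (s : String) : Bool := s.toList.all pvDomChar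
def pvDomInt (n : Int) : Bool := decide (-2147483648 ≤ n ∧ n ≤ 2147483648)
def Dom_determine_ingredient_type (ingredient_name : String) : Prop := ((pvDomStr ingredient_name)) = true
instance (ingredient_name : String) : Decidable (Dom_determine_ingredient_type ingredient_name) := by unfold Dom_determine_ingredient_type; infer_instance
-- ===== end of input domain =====

-- B scans the name's character windows with one dict lookup per (position, keyword length) instead of
-- testing each keyword for containment; return values proved equal (alternative algorithm, same cost class).


-- ===== PORT A =====
def determine_ingredient_type (ingredient_name : String) : String :=
  let name_lower := PySem.Str.lower ingredient_name
  let vegetables := ["celery", "onion", "tomato", "carrot", "bell pepper", "garlic", "potato",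
                     "sweet potato", "broccoli", "cauliflower", "cabbage", "spinach", "lettuce"]
  let fruits := ["avocado", "lemon", "lime"]
  let grains := ["rice", "lentils", "quinoa"]
  let herbs := ["parsley", "cilantro", "basil"]
  let nuts := ["almonds", "cashews"]
  if vegetables.any (fun v => PySem.Str.isIn v name_lower) then "Vegetables"
  else if fruits.any (fun f => PySem.Str.isIn f name_lower) then "Fruits"
  else if grains.any (fun g => PySem.Str.isIn g name_lower) then "Grains"
  else if herbs.any (fun h => PySem.Str.isIn h name_lower) then "Herbs"
  else if nuts.any (fun n => PySem.Str.isIn n name_lower) then "Nuts & Seeds"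
  else "Pantry Items"

-- ===== PORT B =====
-- B-side helpers: the keyword → (priority, category) table and the two loop bodies of Source B.
def pvPairs : List (String × (Int × String)) :=
  [("celery", (0, "Vegetables")), ("onion", (0, "Vegetables")), ("tomato", (0, "Vegetables")),
   ("carrot", (0, "Vegetables")), ("bell pepper", (0, "Vegetables")), ("garlic", (0, "Vegetables")),
   ("potato", (0, "Vegetables")), ("sweet potato", (0, "Vegetables")), ("broccoli", (0, "Vegetables")),
   ("cauliflower", (0, "Vegetables")), ("cabbage", (0, "Vegetables")), ("spinach", (0, "Vegetables")),
   ("lettuce", (0, "Vegetables")),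
   ("avocado", (1, "Fruits")), ("lemon", (1, "Fruits")), ("lime", (1, "Fruits")),
   ("rice", (2, "Grains")), ("lentils", (2, "Grains")), ("quinoa", (2, "Grains")),
   ("parsley", (3, "Herbs")), ("cilantro", (3, "Herbs")), ("basil", (3, "Herbs")),
   ("almonds", (4, "Nuts & Seeds")), ("cashews", (4, "Nuts & Seeds"))]

def pvTable : PySem.Dict String (Int × String) := PySem.Dict.ofList pvPairs

-- inner loop body of Source B: hash-look-up the window s[i:i+L], keep the smaller-priority hit
def pvInner (s : String) (i : Int) (b : Int × String) (L : Int) : Int × String :=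
  match PySem.Dict.get? pvTable (PySem.Str.slice s (some i) (some (i + L))) with
  | some hit => if hit.1 < b.1 then hit else b
  | none => b

-- outer loop body of Source B: try every keyword length at position i
def pvOuter (s : String) (lengths : List Int) (b : Int × String) (i : Int) : Int × String :=
  lengths.foldl (pvInner s i) b

def pvLens : List Int := PySem.Set.ofList ((PySem.Dict.keys pvTable).map PySem.Str.len)

def determine_ingredient_type_alt (ingredient_name : String) : String :=
  let lengths := pvLens
  let s := PySem.Str.lower ingredient_name
  ((PySem.List.pyRange 0 (PySem.Str.len s) 1).foldl (pvOuter s lengths) ((5 : Int), "Pantry Items")).2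

-- ===== PRECONDITION & SPEC =====
def Spec_determine_ingredient_type (ingredient_name : String) (out : String) : Prop := out = determine_ingredient_type_alt ingredient_name
instance (ingredient_name : String) (out : String) : Decidable (Spec_determine_ingredient_type ingredient_name out) := by unfold Spec_determine_ingredient_type; infer_instance

-- ===== CLAIM (what is proved, stated in full; the proofs are below) =====
def Claim_equal_determine_ingredient_type : Prop := ∀ (ingredient_name : String), Dom_determine_ingredient_type ingredient_name → Spec_determine_ingredient_type ingredient_name (determine_ingredient_type ingredient_name)

-- ===== LEMMAS AND PROOFS =====

-- finite facts about the literal table, all by decide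
theorem pv_items_eq : pvTable.items = pvPairs := by decide

theorem pv_get_mem {k : String} {v : Int × String}
    (h : PySem.Dict.get? pvTable k = some v) : (k, v) ∈ pvPairs :=
  pv_items_eq ▸ PySem.Dict.mem_items_of_get?_eq_some pvTable h

theorem pv_get_self : ∀ e ∈ pvPairs, PySem.Dict.get? pvTable e.1 = some e.2 := by decide

theorem pv_lens_pos : ∀ L ∈ pvLens, (0 : Int) < L := by decide

theorem pv_len_mem : ∀ e ∈ pvPairs, PySem.Str.len e.1 ∈ pvLens := by decide

theorem pv_key_ne : ∀ e ∈ pvPairs, e.1.toList ≠ [] := by decide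

theorem pv_class : ∀ e ∈ pvPairs,
    (e.1 ∈ ["celery", "onion", "tomato", "carrot", "bell pepper", "garlic", "potato",
            "sweet potato", "broccoli", "cauliflower", "cabbage", "spinach", "lettuce"] ∧ e.2 = ((0 : Int), "Vegetables")) ∨
    (e.1 ∈ ["avocado", "lemon", "lime"] ∧ e.2 = ((1 : Int), "Fruits")) ∨
    (e.1 ∈ ["rice", "lentils", "quinoa"] ∧ e.2 = ((2 : Int), "Grains")) ∨
    (e.1 ∈ ["parsley", "cilantro", "basil"] ∧ e.2 = ((3 : Int), "Herbs")) ∨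
    (e.1 ∈ ["almonds", "cashews"] ∧ e.2 = ((4 : Int), "Nuts & Seeds")) := by decide

theorem pv_veg_mem : ∀ kw ∈ ["celery", "onion", "tomato", "carrot", "bell pepper", "garlic", "potato",
    "sweet potato", "broccoli", "cauliflower", "cabbage", "spinach", "lettuce"],
    (kw, ((0 : Int), "Vegetables")) ∈ pvPairs := by decide
theorem pv_fru_mem : ∀ kw ∈ ["avocado", "lemon", "lime"], (kw, ((1 : Int), "Fruits")) ∈ pvPairs := by decide
theorem pv_gra_mem : ∀ kw ∈ ["rice", "lentils", "quinoa"], (kw, ((2 : Int), "Grains")) ∈ pvPairs := by decide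
theorem pv_her_mem : ∀ kw ∈ ["parsley", "cilantro", "basil"], (kw, ((3 : Int), "Herbs")) ∈ pvPairs := by decide
theorem pv_nut_mem : ∀ kw ∈ ["almonds", "cashews"], (kw, ((4 : Int), "Nuts & Seeds")) ∈ pvPairs := by decide

-- soundness invariant: the accumulator is the initial default or the value of a matched table entry
def PvSound (s : String) (b : Int × String) : Prop :=
  b = ((5 : Int), "Pantry Items") ∨ ∃ e ∈ pvPairs, b = e.2 ∧ PySem.Str.isIn e.1 s = true

theorem pv_slice_infix (s : String) (i L : Int) (hi : 0 ≤ i) (hL : 0 ≤ L) :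
    PySem.Str.isIn (PySem.Str.slice s (some i) (some (i + L))) s = true := by
  rw [PySem.Str.isIn_iff_infix, PySem.Str.toList_slice]
  simp only [PySem.Chars.slice_eq_listSlice]
  rw [PySem.List.slice_toNat _ hi (by omega)]
  exact (List.take_prefix _ _).isInfix.trans (List.drop_suffix _ _).isInfix

theorem pv_inner_sound (s : String) {i L : Int} (hi : 0 ≤ i) (hL : 0 < L) {b : Int × String}
    (hb : PvSound s b) : PvSound s (pvInner s i b L) := by
  unfold pvInner
  cases h : PySem.Dict.get? pvTable (PySem.Str.slice s (some i) (some (i + L))) with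
  | none => exact hb
  | some hit =>
    dsimp only
    split_ifs with hlt
    · exact Or.inr ⟨(_, hit), pv_get_mem h, rfl, pv_slice_infix s i L hi (le_of_lt hL)⟩
    · exact hb

theorem pv_inner_fst_le (s : String) (i : Int) (b : Int × String) (L : Int) :
    (pvInner s i b L).1 ≤ b.1 := by
  unfold pvInner
  cases h : PySem.Dict.get? pvTable (PySem.Str.slice s (some i) (some (i + L))) with
  | none => exact le_refl _
  | some hit =>
    dsimp only
    split_ifs with hlt
    · exact le_of_lt hlt
    · exact le_refl _

theorem pv_foldl_fst_le (g : Int × String → Int → Int × String)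
    (hm : ∀ b L, (g b L).1 ≤ b.1) (l : List Int) (b : Int × String) :
    (l.foldl g b).1 ≤ b.1 :=
  List.foldlRecOn (motive := fun x => x.1 ≤ b.1) l g (le_refl b.1)
    (fun acc h a _ => le_trans (hm acc a) h)

theorem pv_foldl_le_of_mem (g : Int × String → Int → Int × String)
    (hm : ∀ b L, (g b L).1 ≤ b.1) {x c : Int} (hx : ∀ b, (g b x).1 ≤ c) :
    ∀ l : List Int, x ∈ l → ∀ b, (l.foldl g b).1 ≤ c := by
  intro l
  induction l with
  | nil => intro h; simp at h
  | cons a t ih =>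
    intro h b
    rw [List.foldl_cons]
    rcases List.mem_cons.mp h with rfl | hm'
    · exact le_trans (pv_foldl_fst_le g hm t (g b x)) (hx b)
    · exact ih hm' (g b a)

theorem pv_sound (s : String) :
    PvSound s ((PySem.List.pyRange 0 (PySem.Str.len s) 1).foldl (pvOuter s pvLens) ((5 : Int), "Pantry Items")) := by
  refine List.foldlRecOn _ _ (Or.inl rfl) ?_
  intro b hb i hi
  have hi0 : 0 ≤ i := (PySem.List.mem_pyRange_one.mp hi).1
  unfold pvOuter
  refine List.foldlRecOn _ _ hb ?_
  intro b' hb' L hL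
  exact pv_inner_sound s hi0 (pv_lens_pos L hL) hb'

theorem pv_min (s : String) : ∀ e ∈ pvPairs, PySem.Str.isIn e.1 s = true →
    ((PySem.List.pyRange 0 (PySem.Str.len s) 1).foldl (pvOuter s pvLens) ((5 : Int), "Pantry Items")).1 ≤ e.2.1 := by
  intro e he hin
  have hinf : PySem.Chars.isIn e.1.toList s.toList = true := by simpa using hin
  obtain ⟨j, hj⟩ := (PySem.Chars.exists_prefix_drop_iff_isIn e.1.toList s.toList).mpr hinf
  have hjlt : j < s.toList.length := by
    by_contra hge
    rw [List.drop_eq_nil_of_le (by omega)] at hj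
    exact pv_key_ne e he (List.prefix_nil.mp hj)
  have hkey : PySem.Str.slice s (some (j : Int)) (some ((j : Int) + PySem.Str.len e.1)) = e.1 := by
    apply String.ext
    rw [PySem.Str.toList_slice]
    simp only [PySem.Chars.slice_eq_listSlice]
    rw [PySem.Str.len_eq, PySem.List.slice_natCast_add]
    exact (List.prefix_iff_eq_take.mp hj).symm
  have hach : ∀ b : Int × String, (pvInner s (j : Int) b (PySem.Str.len e.1)).1 ≤ e.2.1 := by
    intro b
    unfold pvInner
    rw [hkey, pv_get_self e he]
    dsimp only
    split_ifs with h
    · exact le_refl _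
    · exact not_lt.mp h
  have houter : ∀ b : Int × String, (pvOuter s pvLens b (j : Int)).1 ≤ e.2.1 := by
    intro b
    unfold pvOuter
    exact pv_foldl_le_of_mem (pvInner s (j : Int)) (pv_inner_fst_le s (j : Int)) hach pvLens (pv_len_mem e he) b
  have hmem : (j : Int) ∈ PySem.List.pyRange 0 (PySem.Str.len s) 1 := by
    rw [PySem.List.mem_pyRange_one]
    refine ⟨Int.natCast_nonneg j, ?_⟩
    rw [PySem.Str.len_eq]
    exact_mod_cast hjlt
  exact pv_foldl_le_of_mem (pvOuter s pvLens)
    (fun b i => pv_foldl_fst_le (pvInner s i) (pv_inner_fst_le s i) pvLens b) houter _ hmem _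

theorem pv_main (s : String) :
    (if ["celery", "onion", "tomato", "carrot", "bell pepper", "garlic", "potato",
         "sweet potato", "broccoli", "cauliflower", "cabbage", "spinach", "lettuce"].any (fun v => PySem.Str.isIn v s) then "Vegetables"
     else if ["avocado", "lemon", "lime"].any (fun f => PySem.Str.isIn f s) then "Fruits"
     else if ["rice", "lentils", "quinoa"].any (fun g => PySem.Str.isIn g s) then "Grains"
     else if ["parsley", "cilantro", "basil"].any (fun h => PySem.Str.isIn h s) then "Herbs"
     else if ["almonds", "cashews"].any (fun n => PySem.Str.isIn n s) then "Nuts & Seeds"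
     else "Pantry Items")
    = ((PySem.List.pyRange 0 (PySem.Str.len s) 1).foldl (pvOuter s pvLens) ((5 : Int), "Pantry Items")).2 := by
  have hS := pv_sound s
  have hM := pv_min s
  set best := (PySem.List.pyRange 0 (PySem.Str.len s) 1).foldl (pvOuter s pvLens) ((5 : Int), "Pantry Items") with hbest
  clear_value best
  split_ifs with h0 h1 h2 h3 h4
  · -- Vegetables
    obtain ⟨kw, hkwm, hkin⟩ := List.any_eq_true.mp h0
    have hle := hM _ (pv_veg_mem kw hkwm) hkin
    rcases hS with hdef | ⟨e, hem, hbe, hein⟩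
    · rw [hdef] at hle; norm_num at hle
    · rcases pv_class e hem with ⟨_, h2⟩ | ⟨_, h2⟩ | ⟨_, h2⟩ | ⟨_, h2⟩ | ⟨_, h2⟩ <;>
        rw [hbe, h2] at hle ⊢ <;> first | rfl | norm_num at hle
  · -- Fruits
    obtain ⟨kw, hkwm, hkin⟩ := List.any_eq_true.mp h1
    have hle := hM _ (pv_fru_mem kw hkwm) hkin
    rcases hS with hdef | ⟨e, hem, hbe, hein⟩
    · rw [hdef] at hle; norm_num at hle
    · rcases pv_class e hem with ⟨hc1, hc⟩ | ⟨hc1, hc⟩ | ⟨hc1, hc⟩ | ⟨hc1, hc⟩ | ⟨hc1, hc⟩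
      · exact absurd (List.any_eq_true.mpr ⟨e.1, hc1, hein⟩) h0
      · rw [hbe, hc]
      · rw [hbe, hc] at hle; norm_num at hle
      · rw [hbe, hc] at hle; norm_num at hle
      · rw [hbe, hc] at hle; norm_num at hle
  · -- Grains
    obtain ⟨kw, hkwm, hkin⟩ := List.any_eq_true.mp h2
    have hle := hM _ (pv_gra_mem kw hkwm) hkin
    rcases hS with hdef | ⟨e, hem, hbe, hein⟩
    · rw [hdef] at hle; norm_num at hle
    · rcases pv_class e hem with ⟨hc1, hc⟩ | ⟨hc1, hc⟩ | ⟨hc1, hc⟩ | ⟨hc1, hc⟩ | ⟨hc1, hc⟩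
      · exact absurd (List.any_eq_true.mpr ⟨e.1, hc1, hein⟩) h0
      · exact absurd (List.any_eq_true.mpr ⟨e.1, hc1, hein⟩) h1
      · rw [hbe, hc]
      · rw [hbe, hc] at hle; norm_num at hle
      · rw [hbe, hc] at hle; norm_num at hle
  · -- Herbs
    obtain ⟨kw, hkwm, hkin⟩ := List.any_eq_true.mp h3
    have hle := hM _ (pv_her_mem kw hkwm) hkin
    rcases hS with hdef | ⟨e, hem, hbe, hein⟩
    · rw [hdef] at hle; norm_num at hle
    · rcases pv_class e hem with ⟨hc1, hc⟩ | ⟨hc1, hc⟩ | ⟨hc1, hc⟩ | ⟨hc1, hc⟩ | ⟨hc1, hc⟩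
      · exact absurd (List.any_eq_true.mpr ⟨e.1, hc1, hein⟩) h0
      · exact absurd (List.any_eq_true.mpr ⟨e.1, hc1, hein⟩) h1
      · exact absurd (List.any_eq_true.mpr ⟨e.1, hc1, hein⟩) h2
      · rw [hbe, hc]
      · rw [hbe, hc] at hle; norm_num at hle
  · -- Nuts & Seeds
    obtain ⟨kw, hkwm, hkin⟩ := List.any_eq_true.mp h4
    have hle := hM _ (pv_nut_mem kw hkwm) hkin
    rcases hS with hdef | ⟨e, hem, hbe, hein⟩
    · rw [hdef] at hle; norm_num at hle
    · rcases pv_class e hem with ⟨hc1, hc⟩ | ⟨hc1, hc⟩ | ⟨hc1, hc⟩ | ⟨hc1, hc⟩ | ⟨hc1, hc⟩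
      · exact absurd (List.any_eq_true.mpr ⟨e.1, hc1, hein⟩) h0
      · exact absurd (List.any_eq_true.mpr ⟨e.1, hc1, hein⟩) h1
      · exact absurd (List.any_eq_true.mpr ⟨e.1, hc1, hein⟩) h2
      · exact absurd (List.any_eq_true.mpr ⟨e.1, hc1, hein⟩) h3
      · rw [hbe, hc]
  · -- Pantry Items
    rcases hS with hdef | ⟨e, hem, hbe, hein⟩
    · rw [hdef]
    · rcases pv_class e hem with ⟨hc1, _⟩ | ⟨hc1, _⟩ | ⟨hc1, _⟩ | ⟨hc1, _⟩ | ⟨hc1, _⟩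
      · exact absurd (List.any_eq_true.mpr ⟨e.1, hc1, hein⟩) h0
      · exact absurd (List.any_eq_true.mpr ⟨e.1, hc1, hein⟩) h1
      · exact absurd (List.any_eq_true.mpr ⟨e.1, hc1, hein⟩) h2
      · exact absurd (List.any_eq_true.mpr ⟨e.1, hc1, hein⟩) h3
      · exact absurd (List.any_eq_true.mpr ⟨e.1, hc1, hein⟩) h4

-- ===== VERDICT (by name: the statement is the Claim_ definition above) =====
theorem determine_ingredient_type_spec : Claim_equal_determine_ingredient_type := by
  intro ingredient_name _
  unfold Spec_determine_ingredient_type determine_ingredient_type determine_ingredient_type_alt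
  exact pv_main (PySem.Str.lower ingredient_name)
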